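-- pv_equiv track=rewrite | github.com/YashB63/GFG-Daily-Questions | Day 758/Play with an array/play_with_an_array.py | formatArray
-- ===== SOURCE A (Python) =====
-- def formatArray(arr):
--     arr.sort()
--     i = 0
--     j = len(arr) // 2
--     if len(arr) % 2 == 1:
--         j += 1
--     while j < len(arr):
--         if arr[i] >= arr[j]:
--             return False
--         i += 1
--         j += 1
--     return True
-- ===== SOURCE B (Python) =====
-- def formatArray(arr):
--     arr.sort()
--     maxrun = 0
--     run = 0
--     prev = None
--     for x in arr:
--         if prev is not None and x == prev:
--             run += 1
--         else:
--             run = 1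
--         prev = x
--         if run > maxrun:
--             maxrun = run
--     return maxrun <= (len(arr) + 1) // 2
-- ===== Notes on version B (the rewrite author's own statement) =====
-- stated objective: alternative
-- what changed: Replaced A's two-pointer walk comparing arr[i] with arr[i+ceil(n/2)] across the midpoint of the sorted array by a single run-length scan of the sorted array that tracks the longest run of equal elements and returns maxrun <= (n+1)//2.
import Mathlib
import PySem

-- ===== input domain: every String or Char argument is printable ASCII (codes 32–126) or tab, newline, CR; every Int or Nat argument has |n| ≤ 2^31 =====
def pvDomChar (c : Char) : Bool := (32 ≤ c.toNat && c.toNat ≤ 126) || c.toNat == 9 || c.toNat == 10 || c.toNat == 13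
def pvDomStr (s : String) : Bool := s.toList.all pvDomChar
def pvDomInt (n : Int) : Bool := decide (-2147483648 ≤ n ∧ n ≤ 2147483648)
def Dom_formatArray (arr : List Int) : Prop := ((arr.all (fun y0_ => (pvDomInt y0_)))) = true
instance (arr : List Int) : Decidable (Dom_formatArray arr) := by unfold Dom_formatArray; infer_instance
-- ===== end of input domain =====

-- B replaces A's two-pointer walk comparing arr[i] with arr[i+ceil(n/2)] on the sorted array by a
-- single run-length scan of the sorted array (longest run of equal elements ≤ ceil(n/2)); same cost.
-- In Python both A and B sort arr in place; the equivalence proved here is about the return value.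

-- ===== PORT A =====
-- A's while loop: i and j walk up together; both indices are always in range (i < j < len s),
-- so getD's default 0 is never read (Python's arr[i]/arr[j] never raises here)
def formatArrayLoop (s : List Int) (i j : Nat) : Bool :=
  if h : j < s.length then
    if s.getD i 0 ≥ s.getD j 0 then false
    else formatArrayLoop s (i + 1) (j + 1)
  else true
termination_by s.length - j

def formatArray (arr : List Int) : Bool :=
  let s := PySem.List.sorted arr (fun x => x) false
  let j := s.length / 2 + (if s.length % 2 == 1 then 1 else 0)
  formatArrayLoop s 0 j

-- ===== PORT B =====
-- the for loop of Source B, state (prev, run, maxrun); 'max maxrun run'' is the 'if run > maxrun' update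
def runScan (s : List Int) (prev : Option Int) (run maxrun : Nat) : Nat :=
  match s with
  | [] => maxrun
  | x :: xs =>
    let run' := if prev = some x then run + 1 else 1
    runScan xs (some x) run' (max maxrun run')

def formatArray_alt (arr : List Int) : Bool :=
  let s := PySem.List.sorted arr (fun x => x) false
  decide (runScan s none 0 0 ≤ (s.length + 1) / 2)

-- ===== PRECONDITION & SPEC =====
def Spec_formatArray (arr : List Int) (out : Bool) : Prop := out = formatArray_alt arr
instance (arr : List Int) (out : Bool) : Decidable (Spec_formatArray arr out) := by unfold Spec_formatArray; infer_instance

-- ===== CLAIM (what is proved, stated in full; the proofs are below) =====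
def Claim_equal_formatArray : Prop := ∀ (arr : List Int), Dom_formatArray arr → Spec_formatArray arr (formatArray arr)

-- ===== LEMMAS AND PROOFS =====

-- A's loop returns true iff every pair of positions at the fixed distance j - i is strictly increasing
theorem loop_iff (s : List Int) (i j : Nat) :
    formatArrayLoop s i j = true ↔
      ∀ t, j + t < s.length → s.getD (i + t) 0 < s.getD (j + t) 0 := by
  induction i, j using formatArrayLoop.induct (s := s) with
  | case1 i j h hge =>
    rw [formatArrayLoop]
    simp only [dif_pos h, if_pos hge]
    constructor
    · intro hfalse; exact absurd hfalse (by simp)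
    · intro hall
      exfalso
      have := hall 0 (by omega)
      simp only [Nat.add_zero] at this
      omega
  | case2 i j h hge ih =>
    rw [formatArrayLoop]
    simp only [dif_pos h, if_neg hge]
    rw [ih]
    constructor
    · intro hall t ht
      cases t with
      | zero => simpa using (by omega : s.getD i 0 < s.getD j 0)
      | succ t =>
        have := hall t (by omega)
        have e1 : i + 1 + t = i + (t + 1) := by omega
        have e2 : j + 1 + t = j + (t + 1) := by omega
        rwa [e1, e2] at this
    · intro hall t ht
      have := hall (t + 1) (by omega)
      have e1 : i + 1 + t = i + (t + 1) := by omega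
      have e2 : j + 1 + t = j + (t + 1) := by omega
      rwa [e1, e2]
  | case3 i j h =>
    rw [formatArrayLoop]
    simp only [dif_neg h]
    constructor
    · intro _ t ht; omega
    · intro _; trivial

-- B's scan, expressed through the leading run of the current element and the rest of the list
theorem runScan_eq (xs : List Int) : ∀ (p : Int) (run maxrun : Nat), run ≤ maxrun →
    runScan xs (some p) run maxrun =
      max maxrun (max (run + (xs.takeWhile (· == p)).length)
        (runScan (xs.dropWhile (· == p)) none 0 0)) := by
  induction xs with
  | nil => intro p run maxrun h; simp [runScan]; omega
  | cons x xs ih =>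
    intro p run maxrun h
    by_cases hxp : x = p
    · subst hxp
      rw [runScan]
      simp only [List.takeWhile_cons, List.dropWhile_cons, beq_self_eq_true, if_pos trivial]
      rw [ih x (run + 1) (max maxrun (run + 1)) (by omega)]
      simp only [List.length_cons]
      omega
    · have hbeq : (x == p) = false := by simp [hxp]
      rw [runScan]
      simp only [List.takeWhile_cons, List.dropWhile_cons, hbeq, Bool.false_eq_true, if_false,
        if_neg (by simp [Ne.symm hxp] : ¬ (some p = some x))]
      rw [ih x 1 (max maxrun 1) (by omega)]
      have hM : runScan (x :: xs) none 0 0 =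
          max (1 + (xs.takeWhile (· == x)).length) (runScan (xs.dropWhile (· == x)) none 0 0) := by
        rw [runScan]
        simp only [if_neg (by simp : ¬ ((none : Option Int) = some x))]
        rw [ih x 1 (max 0 1) (by omega)]
        omega
      rw [hM]
      simp only [List.length_nil]
      omega

theorem runScan_cons (x : Int) (xs : List Int) :
    runScan (x :: xs) none 0 0 =
      max (1 + (xs.takeWhile (· == x)).length)
        (runScan (xs.dropWhile (· == x)) none 0 0) := by
  rw [runScan]
  simp only [if_neg (by simp : ¬ ((none : Option Int) = some x))]
  rw [runScan_eq xs x 1 (max 0 1) (by omega)]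
  omega

theorem dropWhile_head_false (p : Int → Bool) (y : Int) (t' : List Int) :
    ∀ l : List Int, l.dropWhile p = y :: t' → p y = false := by
  intro l
  induction l with
  | nil => intro h; simp at h
  | cons x l ih =>
    intro h
    by_cases hx : p x
    · rw [List.dropWhile_cons_of_pos hx] at h; exact ih h
    · rw [List.dropWhile_cons_of_neg hx] at h
      cases h
      simpa using hx

-- on a sorted list the longest run exceeds k exactly when two positions at distance k hold equal values
theorem runMax_iff (k : Nat) : ∀ (n : Nat) (s : List Int), s.length ≤ n →
    s.Pairwise (· ≤ ·) →
    (k + 1 ≤ runScan s none 0 0 ↔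
      ∃ i, i + k < s.length ∧ s.getD i 0 = s.getD (i + k) 0) := by
  intro n
  induction n with
  | zero =>
    intro s hlen hp
    have hs : s = [] := List.length_eq_zero_iff.mp (Nat.le_zero.mp hlen)
    subst hs
    simp [runScan]
  | succ n ih =>
    intro s hlen hp
    match s with
    | [] => simp [runScan]
    | x :: xs =>
      have hxle : ∀ y ∈ xs, x ≤ y := (List.pairwise_cons.mp hp).1
      have hpxs : xs.Pairwise (· ≤ ·) := (List.pairwise_cons.mp hp).2
      set a := xs.takeWhile (· == x) with ha
      set t := xs.dropWhile (· == x) with htd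
      set m := a.length with hm
      have hxsat : a ++ t = xs := List.takeWhile_append_dropWhile
      have hax : ∀ y ∈ a, y = x := fun y hy => by
        have := List.mem_takeWhile_imp hy
        exact eq_of_beq this
      have hsub : t.Sublist xs := List.dropWhile_sublist _
      have hpt : t.Pairwise (· ≤ ·) := List.Pairwise.sublist hsub hpxs
      have hlen_t : t.length ≤ n := by
        have h1 : t.length ≤ xs.length := hsub.length_le
        have h2 : xs.length ≤ n := by simpa using hlen
        omega
      have htgt : ∀ y ∈ t, x < y := by
        intro y hy
        match htc : t with
        | [] => simp [htc] at hy
        | z :: t' =>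
          have hz : (z == x) = false := dropWhile_head_false _ z t' xs htd.symm
          have hzx : z ≠ x := by simpa using hz
          have hzle : x ≤ z := hxle z (hsub.subset (by simp))
          have hzlt : x < z := lt_of_le_of_ne hzle (Ne.symm hzx)
          rcases (by simpa using hy : y = z ∨ y ∈ t') with rfl | hyt
          · exact hzlt
          · have : z ≤ y := (List.pairwise_cons.mp (htc ▸ hpt)).1 y hyt
            omega
      have hlens : (x :: xs).length = m + 1 + t.length := by
        rw [← hxsat]; simp [hm]; omega
      have hlow : ∀ i, i ≤ m → (x :: xs).getD i 0 = x := by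
        intro i hi
        match i with
        | 0 => simp
        | Nat.succ i' =>
          have hi' : i' < m := by omega
          have : (x :: xs).getD (i' + 1) 0 = xs.getD i' 0 := by simp
          rw [this, ← hxsat, List.getD_append a t 0 i' hi']
          exact hax _ (by rw [a.getD_eq_getElem 0 hi']; exact List.getElem_mem hi')
      have hhigh : ∀ i, m + 1 ≤ i → (x :: xs).getD i 0 = t.getD (i - (m + 1)) 0 := by
        intro i hi
        match i with
        | Nat.succ i' =>
          have : (x :: xs).getD (i' + 1) 0 = xs.getD i' 0 := by simp
          rw [this, ← hxsat, List.getD_append_right a t 0 i' (by omega)]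
          congr 1
          omega
      have htmem : ∀ j, j < t.length → t.getD j 0 ∈ t := by
        intro j hj
        rw [t.getD_eq_getElem 0 hj]; exact List.getElem_mem hj
      rw [runScan_cons, ← ha, ← htd, ← hm]
      rw [Std.le_max]
      rw [ih t hlen_t hpt]
      constructor
      · rintro (h1 | ⟨i, hik, heq⟩)
        · refine ⟨0, by omega, ?_⟩
          have e0 : 0 + k = k := by omega
          rw [e0, hlow 0 (by omega), hlow k (by omega)]
        · exact ⟨i + (m + 1), by omega, by
            rw [hhigh (i + (m + 1)) (by omega), hhigh (i + (m + 1) + k) (by omega)]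
            have e1 : i + (m + 1) - (m + 1) = i := by omega
            have e2 : i + (m + 1) + k - (m + 1) = i + k := by omega
            rw [e1, e2]; exact heq⟩
      · rintro ⟨i, hik, heq⟩
        by_cases hi : i ≤ m
        · by_cases hik2 : i + k ≤ m
          · left; omega
          · exfalso
            rw [hlow i hi, hhigh (i + k) (by omega)] at heq
            have hmem : t.getD (i + k - (m + 1)) 0 ∈ t := htmem _ (by omega)
            have := htgt _ hmem
            omega
        · right
          refine ⟨i - (m + 1), by omega, ?_⟩
          rw [hhigh i (by omega), hhigh (i + k) (by omega)] at heq
          have e2 : i + k - (m + 1) = i - (m + 1) + k := by omega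
          rw [e2] at heq
          exact heq

theorem pairwise_getD_le (s : List Int) (hp : s.Pairwise (· ≤ ·)) (i j : Nat)
    (hij : i < j) (hj : j < s.length) : s.getD i 0 ≤ s.getD j 0 := by
  rw [s.getD_eq_getElem 0 (by omega), s.getD_eq_getElem 0 hj]
  exact List.pairwise_iff_getElem.mp hp i j (by omega) hj hij

theorem formatArray_eq (arr : List Int) : formatArray arr = formatArray_alt arr := by
  unfold formatArray formatArray_alt
  have hp : (PySem.List.sorted arr (fun x => x) false).Pairwise (· ≤ ·) := by
    simpa using PySem.List.sorted_pairwise arr (fun x => x)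
  set s := PySem.List.sorted arr (fun x => x) false with hs
  have hk : s.length / 2 + (if s.length % 2 == 1 then 1 else 0) = (s.length + 1) / 2 := by
    rcases Nat.mod_two_eq_zero_or_one s.length with h | h <;> simp [h] <;> omega
  show formatArrayLoop s 0 (s.length / 2 + (if s.length % 2 == 1 then 1 else 0)) =
    decide (runScan s none 0 0 ≤ (s.length + 1) / 2)
  rw [hk]
  set k := (s.length + 1) / 2 with hkdef
  have hchar := runMax_iff k s.length s (le_refl _) hp
  rw [Bool.eq_iff_iff, loop_iff]
  simp only [decide_eq_true_eq]
  constructor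
  · intro hall
    by_contra hnot
    obtain ⟨i, hik, heq⟩ := hchar.mp (by omega)
    have hlt := hall i (by omega)
    have e1 : 0 + i = i := by omega
    have e2 : k + i = i + k := by omega
    rw [e1, e2] at hlt
    omega
  · intro hle t ht
    have e1 : 0 + t = t := by omega
    have e2 : k + t = t + k := by omega
    rw [e1, e2]
    have hne : s.getD t 0 ≠ s.getD (t + k) 0 := by
      intro heq
      have := hchar.mpr ⟨t, by omega, heq⟩
      omega
    have hk1 : 1 ≤ k := by
      have : 1 ≤ s.length := by omega
      omega
    have hlele : s.getD t 0 ≤ s.getD (t + k) 0 :=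
      pairwise_getD_le s hp t (t + k) (by omega) (by omega)
    omega

-- ===== VERDICT (by name: the statement is the Claim_ definition above) =====
theorem formatArray_spec : Claim_equal_formatArray := by
  intro arr _
  exact formatArray_eq arr
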